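-- pv_equiv track=rewrite | github.com/Gkao03/LeetcodeDoc | array/2673_MakeCostsOfPathsEqualInBinaryTree.py | minIncrements
-- ===== SOURCE A (Python) =====
-- from typing import List
--
-- def minIncrements(n: int, cost: List[int]) -> int:
--     # equalize the cost from each sub path
--     # calculate the cost of the current path from current node (inclusive) to leaf
--     # edit cost values in place to save space
--
--     answer = 0
--
--     for i in range(n - 1, 0, -2):  # don't need to check index 0 (root)
--         cl_idx = i - 1
--         cr_idx = i
--         parent_idx = cl_idx // 2
--
--         answer += abs(cost[cl_idx] - cost[cr_idx])
--         cost[parent_idx] = cost[parent_idx] + max(cost[cl_idx], cost[cr_idx])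
--
--     return answer
-- ===== SOURCE B (Python) =====
-- from typing import List
--
-- # B: recursive DFS over the array-encoded tree, returning (max root-to-leaf cost,
-- # increments) per subtree. Unlike A it does not mutate `cost`; return values agree.
-- def minIncrements(n: int, cost: List[int]) -> int:
--     if n <= 0:
--         return 0
--
--     def dfs(node):
--         # (max path cost from node down to a leaf, increments needed inside subtree)
--         l = 2 * node + 1
--         if l >= n:
--             return cost[node], 0
--         a, x = dfs(l)
--         b, y = dfs(l + 1)
--         return cost[node] + max(a, b), x + y + abs(a - b)
--
--     return dfs(0)[1]
-- ===== Notes on version B (the rewrite author's own statement) =====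
-- stated objective: alternative
-- what changed: Replaces A's bottom-up index loop that mutates cost[] in place with a pure recursive DFS over the heap-encoded tree that returns (subtree max path, subtree increments) pairs; B does not mutate the argument.
-- outside the precondition, e.g. on minIncrements(2, [5, 1, 9]): A returns 4, B returns 8; on minIncrements(2, [1, 2]): A returns 1, B raises IndexError
import Mathlib
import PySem

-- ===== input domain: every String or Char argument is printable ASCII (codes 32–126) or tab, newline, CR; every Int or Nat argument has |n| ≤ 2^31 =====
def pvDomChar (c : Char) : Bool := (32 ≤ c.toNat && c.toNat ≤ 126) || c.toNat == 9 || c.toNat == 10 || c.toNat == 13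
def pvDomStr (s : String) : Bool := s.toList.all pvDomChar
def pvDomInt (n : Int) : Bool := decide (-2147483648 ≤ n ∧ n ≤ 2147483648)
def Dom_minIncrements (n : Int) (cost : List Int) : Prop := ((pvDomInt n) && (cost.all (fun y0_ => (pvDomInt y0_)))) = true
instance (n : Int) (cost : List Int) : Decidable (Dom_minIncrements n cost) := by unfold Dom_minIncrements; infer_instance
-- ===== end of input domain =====

-- B replaces A's in-place bottom-up index loop with a pure recursive DFS returning
-- (subtree max path, subtree increments); A mutates `cost` in place and B does not,
-- so the equivalence proved here is about the RETURN value only.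

-- ===== PORT A =====
-- the for-loop of A: state (answer, cost); none = IndexError
def loopA : List Int → Int × List Int → Option (Int × List Int)
  | [], st => some st
  | i :: rest, (ans, cost) =>
    let cl_idx := i - 1
    let cr_idx := i
    let parent_idx := PySem.Int.floordiv cl_idx 2
    match PySem.List.pyGet? cost cl_idx, PySem.List.pyGet? cost cr_idx,
          PySem.List.pyGet? cost parent_idx with
    | some cl, some cr, some cp =>
        loopA rest (ans + |cl - cr|, PySem.List.pySetD cost parent_idx (cp + max cl cr))
    | _, _, _ => none

def minIncrements (n : Int) (cost : List Int) : Int :=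
  ((loopA (PySem.List.pyRange (n - 1) 0 (-2)) (0, cost)).map Prod.fst).getD 0

-- ===== PORT B =====
-- B's dfs; node is a Nat (B only ever calls it on 0, 2*node+1, 2*node+2).
-- cost[node] is read with pyGet?/getD 0: inside Pre_ the index is always in range.
def dfsB (n : Int) (cost : List Int) (node : Nat) : Int × Int :=
  if n ≤ 2 * (node : Int) + 1 then
    ((PySem.List.pyGet? cost (node : Int)).getD 0, 0)
  else
    let l := dfsB n cost (2 * node + 1)
    let r := dfsB n cost (2 * node + 2)
    ((PySem.List.pyGet? cost (node : Int)).getD 0 + max l.1 r.1,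
     l.2 + r.2 + |l.1 - r.1|)
termination_by n.toNat - node
decreasing_by all_goals omega

def minIncrements_alt (n : Int) (cost : List Int) : Int :=
  if n ≤ 0 then 0 else (dfsB n cost 0).2

-- ===== PRECONDITION & SPEC =====
-- Pre_ excludes (a) n > len(cost), where A raises IndexError, and (b) even n ≥ 2,
-- where cost does not encode a full binary tree (the problem's contract) and A's
-- loop pairs non-sibling indices while B's DFS walks the actual child indices
-- (and may itself raise IndexError there).
def Pre_minIncrements (n : Int) (cost : List Int) : Prop :=
  n ≤ 0 ∨ (n % 2 = 1 ∧ n ≤ cost.length)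
instance (n : Int) (cost : List Int) : Decidable (Pre_minIncrements n cost) := by
  unfold Pre_minIncrements; infer_instance

def pvWitness_minIncrements : Int × List Int := (3, [1, 5, 3])

def Spec_minIncrements (n : Int) (cost : List Int) (out : Int) : Prop := out = minIncrements_alt n cost
instance (n : Int) (cost : List Int) (out : Int) : Decidable (Spec_minIncrements n cost out) := by unfold Spec_minIncrements; infer_instance

-- ===== CLAIM (what is proved, stated in full; the proofs are below) =====
def Claim_equal_minIncrements : Prop := ∀ (n : Int) (cost : List Int), Dom_minIncrements n cost → Pre_minIncrements n cost → Spec_minIncrements n cost (minIncrements n cost)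

-- ===== LEMMAS AND PROOFS =====

-- M v / S v: the two components of B's dfs
def pvM (n : Int) (c : List Int) (v : Nat) : Int := (dfsB n c v).1
def pvG (n : Int) (c : List Int) (q : Nat) : Int :=
  |pvM n c (2 * q + 1) - pvM n c (2 * q + 2)|

-- heap parent and its iterates
def pvPar (q : Nat) : Nat := (q - 1) / 2
def pvParIter : Nat → Nat → Nat
  | 0, q => q
  | k + 1, q => pvPar (pvParIter k q)

-- the set of internal nodes of the subtree rooted at v
def pvD (n : Int) (v : Nat) : Finset Nat :=
  if n ≤ 2 * (v : Int) + 1 then ∅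
  else {v} ∪ pvD n (2 * v + 1) ∪ pvD n (2 * v + 2)
termination_by n.toNat - v
decreasing_by all_goals omega

theorem pvPar_left (v : Nat) : pvPar (2 * v + 1) = v := by unfold pvPar; omega
theorem pvPar_right (v : Nat) : pvPar (2 * v + 2) = v := by unfold pvPar; omega
theorem pvPar_le (q : Nat) : pvPar q ≤ q := by unfold pvPar; omega

theorem pvParIter_le (k q : Nat) : pvParIter k q ≤ q := by
  induction k with
  | zero => simp [pvParIter]
  | succ k ih => calc pvParIter (k+1) q = pvPar (pvParIter k q) := rfl
      _ ≤ pvParIter k q := pvPar_le _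
      _ ≤ q := ih

theorem pvParIter_succ' (k q : Nat) : pvParIter (k + 1) q = pvParIter k (pvPar q) := by
  induction k generalizing q with
  | zero => rfl
  | succ k ih => show pvPar (pvParIter (k+1) q) = _; rw [ih]; rfl

theorem pvParIter_shift (j m q : Nat) :
    pvParIter (m + j) q = pvParIter m (pvParIter j q) := by
  induction j generalizing q with
  | zero => rfl
  | succ j ih =>
    rw [show m + (j + 1) = (m + j) + 1 by omega, pvParIter_succ', ih, ← pvParIter_succ']

theorem pvD_leaf {n : Int} {v : Nat} (h : n ≤ 2 * (v : Int) + 1) : pvD n v = ∅ := by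
  rw [pvD]; simp [h]

theorem pvD_node {n : Int} {v : Nat} (h : 2 * (v : Int) + 1 < n) :
    pvD n v = {v} ∪ pvD n (2 * v + 1) ∪ pvD n (2 * v + 2) := by
  rw [pvD]; simp [not_le.mpr h]

theorem pvD_lb (n : Int) (v q : Nat) (hq : q ∈ pvD n v) : v ≤ q := by
  induction v using pvD.induct n with
  | case1 v h => rw [pvD_leaf h] at hq; simp at hq
  | case2 v h ih1 ih2 =>
    rw [pvD_node (by omega)] at hq
    simp only [Finset.mem_union, Finset.mem_singleton] at hq
    rcases hq with (rfl | h1) | h2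
    · exact le_refl _
    · have := ih1 h1; omega
    · have := ih2 h2; omega

theorem pvD_par (n : Int) (v q : Nat) (hq : q ∈ pvD n v) : ∃ k, pvParIter k q = v := by
  induction v using pvD.induct n with
  | case1 v h => rw [pvD_leaf h] at hq; simp at hq
  | case2 v h ih1 ih2 =>
    rw [pvD_node (by omega)] at hq
    simp only [Finset.mem_union, Finset.mem_singleton] at hq
    rcases hq with (rfl | h1) | h2
    · exact ⟨0, rfl⟩
    · obtain ⟨k, hk⟩ := ih1 h1
      exact ⟨k + 1, by show pvPar (pvParIter k q) = v; rw [hk, pvPar_left]⟩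
    · obtain ⟨k, hk⟩ := ih2 h2
      exact ⟨k + 1, by show pvPar (pvParIter k q) = v; rw [hk, pvPar_right]⟩

theorem pvD_internal (n : Int) (v q : Nat) (hq : q ∈ pvD n v) : 2 * (q : Int) + 1 < n := by
  induction v using pvD.induct n with
  | case1 v h => rw [pvD_leaf h] at hq; simp at hq
  | case2 v h ih1 ih2 =>
    rw [pvD_node (by omega)] at hq
    simp only [Finset.mem_union, Finset.mem_singleton] at hq
    rcases hq with (rfl | h1) | h2
    · omega
    · exact ih1 h1
    · exact ih2 h2

theorem pvD_disjoint (n : Int) (v : Nat) :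
    Disjoint (pvD n (2 * v + 1)) (pvD n (2 * v + 2)) := by
  rw [Finset.disjoint_left]
  intro q h1 h2
  obtain ⟨j, hj⟩ := pvD_par n _ q h1
  obtain ⟨k, hk⟩ := pvD_par n _ q h2
  rcases Nat.lt_trichotomy j k with h | h | h
  · obtain ⟨m, rfl⟩ : ∃ m, k = (m + 1) + j := ⟨k - j - 1, by omega⟩
    rw [pvParIter_shift, hj, pvParIter_succ', pvPar_left] at hk
    have := pvParIter_le m v; omega
  · rw [h, hk] at hj; omega
  · obtain ⟨m, rfl⟩ : ∃ m, j = (m + 1) + k := ⟨j - k - 1, by omega⟩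
    rw [pvParIter_shift, hk, pvParIter_succ', pvPar_right] at hj
    have := pvParIter_le m v; omega

theorem pvD_self {n : Int} {v : Nat} (h : 2 * (v : Int) + 1 < n) : v ∈ pvD n v := by
  rw [pvD_node h]; simp

theorem pvD_child (n : Int) (v : Nat) :
    ∀ p q, p ∈ pvD n v → (q = 2 * p + 1 ∨ q = 2 * p + 2) → 2 * (q : Int) + 1 < n →
    q ∈ pvD n v := by
  induction v using pvD.induct n with
  | case1 v h => intro p q hp; rw [pvD_leaf h] at hp; simp at hp
  | case2 v h ih1 ih2 =>
    intro p q hp hq hqn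
    rw [pvD_node (by omega)] at hp ⊢
    simp only [Finset.mem_union, Finset.mem_singleton] at hp ⊢
    rcases hp with (rfl | h1) | h2
    · rcases hq with rfl | rfl
      · exact Or.inl (Or.inr (pvD_self hqn))
      · exact Or.inr (pvD_self hqn)
    · exact Or.inl (Or.inr (ih1 p q h1 hq hqn))
    · exact Or.inr (ih2 p q h2 hq hqn)

theorem pvD_zero (n : Int) (q : Nat) :
    q ∈ pvD n 0 ↔ 2 * (q : Int) + 1 < n := by
  constructor
  · exact pvD_internal n 0 q
  · intro hq
    induction q using Nat.strong_induction_on with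
    | _ q ih =>
      rcases Nat.eq_zero_or_pos q with rfl | hpos
      · exact pvD_self (by exact_mod_cast hq)
      · have hchild : q = 2 * pvPar q + 1 ∨ q = 2 * pvPar q + 2 := by unfold pvPar; omega
        have hlt : pvPar q < q := by unfold pvPar; omega
        have hpn : 2 * ((pvPar q : Nat) : Int) + 1 < n := by
          have : ((pvPar q : Nat) : Int) < (q : Int) := by exact_mod_cast hlt
          omega
        exact pvD_child n 0 (pvPar q) q (ih (pvPar q) hlt hpn) hchild hq

-- B's increments are the sum of |M l - M r| over the internal nodes of the subtree
theorem pvS_sum (n : Int) (c : List Int) (v : Nat) :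
    (dfsB n c v).2 = ∑ q ∈ pvD n v, pvG n c q := by
  induction v using pvD.induct n with
  | case1 v h => rw [pvD_leaf h, dfsB, if_pos h]; simp
  | case2 v h ih1 ih2 =>
    have h' : 2 * (v : Int) + 1 < n := by omega
    have hstep : (dfsB n c v).2
        = (dfsB n c (2 * v + 1)).2 + (dfsB n c (2 * v + 2)).2 + pvG n c v := by
      rw [dfsB, if_neg (not_le.mpr h')]
      rfl
    rw [hstep, pvD_node h']
    have hv1 : v ∉ pvD n (2 * v + 1) := fun hm => by have := pvD_lb n _ v hm; omega
    have hv2 : v ∉ pvD n (2 * v + 2) := fun hm => by have := pvD_lb n _ v hm; omega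
    rw [Finset.union_assoc, Finset.sum_union (by
      simp only [Finset.disjoint_left, Finset.mem_singleton]
      rintro q rfl hq
      simp only [Finset.mem_union] at hq
      exact hq.elim (fun h => hv1 h) (fun h => hv2 h)),
      Finset.sum_union (pvD_disjoint n v), Finset.sum_singleton]
    rw [ih1, ih2]; ring

-- ===== A-side lemmas =====

theorem pvRange_nil {a : Int} (h : a ≤ 0) : PySem.List.pyRange a 0 (-2) = [] := by
  unfold PySem.List.pyRange
  norm_num
  intro h'
  omega

theorem pvRange_cons (P : Nat) :
    PySem.List.pyRange (2 * ((P : Int) + 1)) 0 (-2)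
      = (2 * (P : Int) + 2) :: PySem.List.pyRange (2 * (P : Int)) 0 (-2) := by
  unfold PySem.List.pyRange
  norm_num
  have h1 : ((2 * ((P : Int) + 1) + 2 - 1) / 2).toNat = P + 1 := by omega
  have h2 : (if 0 < P then ((2 * (P : Int) + 2 - 1) / 2).toNat else 0) = P := by
    split <;> omega
  rw [h1, h2, List.range_succ_eq_map, List.map_cons, List.map_map]
  congr 1
  apply List.map_congr_left
  intro k _
  simp only [Function.comp_apply]
  push_cast
  ring

-- unfoldings of B's dfs maximum component
theorem pvM_leaf (n : Int) (c0 : List Int) (p : Nat) (h : n ≤ 2 * (p : Int) + 1)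
    (hp : p < c0.length) : pvM n c0 p = c0[p] := by
  rw [pvM, dfsB, if_pos h, PySem.List.pyGet?_natCast, List.getElem?_eq_getElem hp]
  rfl

theorem pvM_node (n : Int) (c0 : List Int) (p : Nat) (h : 2 * (p : Int) + 1 < n)
    (hp : p < c0.length) :
    pvM n c0 p = c0[p] + max (pvM n c0 (2 * p + 1)) (pvM n c0 (2 * p + 2)) := by
  rw [pvM, dfsB, if_neg (not_le.mpr h)]
  show (PySem.List.pyGet? c0 (p : Int)).getD 0
      + max (dfsB n c0 (2 * p + 1)).1 (dfsB n c0 (2 * p + 2)).1 = _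
  rw [PySem.List.pyGet?_natCast, List.getElem?_eq_getElem hp]
  rfl

-- the loop invariant of A: below p the cost array is untouched, from p on it
-- already holds the subtree maxima; running the remaining iterations adds the
-- increments of parents 0..p-1
theorem pvLoopA_inv (n : Int) (c0 : List Int) :
    ∀ (p : Nat), 2 * (p : Int) + 1 ≤ n → n ≤ (c0.length : Int) →
    ∀ (ans : Int) (c : List Int), c.length = c0.length →
    (∀ j : Nat, j < p → PySem.List.pyGet? c (j : Int) = PySem.List.pyGet? c0 (j : Int)) →
    (∀ j : Nat, p ≤ j → j < c.length →
        PySem.List.pyGet? c (j : Int) = some (pvM n c0 j)) →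
    ∃ c', loopA (PySem.List.pyRange (2 * (p : Int)) 0 (-2)) (ans, c)
        = some (ans + ∑ q ∈ Finset.range p, pvG n c0 q, c') := by
  intro p
  induction p with
  | zero =>
    intro _ _ ans c _ _ _
    refine ⟨c, ?_⟩
    rw [show (2 * ((0 : Nat) : Int)) = (0 : Int) by norm_num, pvRange_nil le_rfl]
    simp [loopA]
  | succ p ih =>
    intro hp hlen ans c hc H1 H2
    have hlc : c.length = c0.length := hc
    have hi1 : 2 * p + 1 < c.length := by omega
    have hi2 : 2 * p + 2 < c.length := by omega
    have hip : p < c.length := by omega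
    -- the three reads
    have hcl : PySem.List.pyGet? c (2 * (p : Int) + 1) = some (pvM n c0 (2 * p + 1)) := by
      have := H2 (2 * p + 1) (by omega) hi1
      rw [show (((2 * p + 1 : Nat) : Int)) = 2 * (p : Int) + 1 by push_cast; ring] at this
      exact this
    have hcr : PySem.List.pyGet? c (2 * (p : Int) + 2) = some (pvM n c0 (2 * p + 2)) := by
      have := H2 (2 * p + 2) (by omega) hi2
      rw [show (((2 * p + 2 : Nat) : Int)) = 2 * (p : Int) + 2 by push_cast; ring] at this
      exact this
    have hcp : PySem.List.pyGet? c (p : Int) = some (c0[p]'(by omega)) := by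
      rw [H1 p (by omega), PySem.List.pyGet?_natCast, List.getElem?_eq_getElem (by omega)]
    -- the cons step of the range
    have hrange : PySem.List.pyRange (2 * ((p + 1 : Nat) : Int)) 0 (-2)
        = (2 * (p : Int) + 2) :: PySem.List.pyRange (2 * (p : Int)) 0 (-2) := by
      rw [show (((p + 1 : Nat) : Int)) = (p : Int) + 1 by push_cast; ring, pvRange_cons]
    rw [hrange]
    -- reduce one iteration of the loop
    have hfd : PySem.Int.floordiv (2 * (p : Int) + 1) 2 = (p : Int) := by
      rw [PySem.Int.floordiv_eq_iff_of_pos (by norm_num)]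
      constructor <;> omega
    rw [loopA]
    simp only [show (2 * (p : Int) + 2 - 1) = 2 * (p : Int) + 1 from by ring,
      hfd, hcl, hcr, hcp]
    -- the written value is exactly pvM n c0 p
    have hMp : c0[p]'(by omega) + max (pvM n c0 (2 * p + 1)) (pvM n c0 (2 * p + 2))
        = pvM n c0 p :=
      (pvM_node n c0 p (by push_cast at hp; omega) (by omega)).symm
    have hset : PySem.List.pySetD c (p : Int)
          (c0[p]'(by omega) + max (pvM n c0 (2 * p + 1)) (pvM n c0 (2 * p + 2)))
        = c.set p (pvM n c0 p) := by
      rw [PySem.List.pySetD_of_nonneg _ _ (by positivity), hMp]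
      norm_num
    rw [hset]
    -- apply the induction hypothesis to the updated state
    obtain ⟨c', hc'⟩ := ih (by push_cast at hp ⊢; omega) hlen
      (ans + |pvM n c0 (2 * p + 1) - pvM n c0 (2 * p + 2)|)
      (c.set p (pvM n c0 p)) (by simpa using hc)
      (by
        intro j hj
        rw [PySem.List.pyGet?_natCast, PySem.List.pyGet?_natCast] at *
        rw [List.getElem?_set_ne (by omega)]
        have := H1 j (by omega)
        rwa [PySem.List.pyGet?_natCast, PySem.List.pyGet?_natCast] at this)
      (by
        intro j hj hjlen
        rw [PySem.List.pyGet?_natCast]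
        rcases Nat.eq_or_lt_of_le hj with rfl | hjgt
        · rw [List.getElem?_set_self (by simpa using hip)]
        · rw [List.getElem?_set_ne (by omega)]
          have := H2 j (by omega) (by simpa using hjlen)
          rwa [PySem.List.pyGet?_natCast] at this)
    refine ⟨c', ?_⟩
    rw [hc']
    congr 1
    rw [Finset.sum_range_succ]
    have : pvG n c0 p = |pvM n c0 (2 * p + 1) - pvM n c0 (2 * p + 2)| := rfl
    rw [this]; ring

theorem pv_A_eq_sum (n : Int) (c0 : List Int) (P : Nat) (hn : n = 2 * (P : Int) + 1)
    (hlen : n ≤ (c0.length : Int)) :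
    minIncrements n c0 = ∑ q ∈ Finset.range P, pvG n c0 q := by
  have hstart : n - 1 = 2 * (P : Int) := by omega
  obtain ⟨c', hc'⟩ := pvLoopA_inv n c0 P (by omega) hlen 0 c0 rfl
    (fun j _ => rfl)
    (by
      intro j hj hjlen
      rw [PySem.List.pyGet?_natCast]
      have hleaf : pvM n c0 j = c0[j]'hjlen := pvM_leaf n c0 j (by omega) hjlen
      rw [hleaf, List.getElem?_eq_getElem hjlen])
  rw [minIncrements, hstart, hc']
  simp

theorem pv_B_eq_sum (n : Int) (c0 : List Int) (P : Nat) (hn : n = 2 * (P : Int) + 1) :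
    minIncrements_alt n c0 = ∑ q ∈ Finset.range P, pvG n c0 q := by
  have h0 : ¬ n ≤ 0 := by omega
  rw [minIncrements_alt, if_neg h0, pvS_sum]
  apply Finset.sum_congr _ (fun _ _ => rfl)
  ext q
  rw [pvD_zero n q, Finset.mem_range]
  omega

-- ===== VERDICT (by name: the statement is the Claim_ definition above) =====
theorem minIncrements_spec : Claim_equal_minIncrements := by
  intro n cost _ hpre
  unfold Spec_minIncrements
  by_cases h0 : n ≤ 0
  · rw [minIncrements, minIncrements_alt, if_pos h0, pvRange_nil (by omega)]
    rfl
  · rcases hpre with hle | ⟨hodd, hlen⟩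
    · omega
    · obtain ⟨P, hP⟩ : ∃ P : Nat, n = 2 * (P : Int) + 1 := ⟨((n - 1) / 2).toNat, by omega⟩
      rw [pv_A_eq_sum n cost P hP hlen, pv_B_eq_sum n cost P hP]
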